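-- pv_equiv track=rewrite | github.com/flolep2607/ESISAR_3AS1 | 3A_old/Cours_S2/MA351 - Introduction Е la thВorie des graphes/TD/EX2/main.py | Tri_topo_sans_circuit_par_puits
-- ===== SOURCE A (Python) =====
-- def ensemble_sommet(g):
--     return list(g.keys())
--
-- def sous_graphe(S,g):
--     s={}
--     for i in g.keys():
--         if i in S:
--             s[i]=[]
--             for elem in list(g[i]):
--                 if elem in S:
--                     s[i].append(elem)
--     return s
--
-- def ensemble_puits(g):
--     l = []
--     for x in g.keys():
--         if len(g[x]) == 0:
--             l.append(x)
--     return l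
--
-- def Tri_topo_sans_circuit_par_puits(g):
--     if len(g)==0:
--         phi=dict()
--         n=0
--     else:
--         puits = ensemble_puits(g)
--         S = ensemble_sommet(g)
--         #priver S des puits
--         list(map(S.remove,puits))
--         #map ne modifie S que si on fait list()
--         sg = sous_graphe(S,g)
--         (phi,n) = Tri_topo_sans_circuit_par_puits(sg)
--         #phi[puits] = n
--         for x in puits:
--             phi[x]=n
--     return (phi,n+1)
-- ===== SOURCE B (Python) =====
-- # B: one memoized DFS computes each vertex's removal height h (an edge to a
-- # present vertex y costs h(y)+1, an edge to an absent vertex survives exactly one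
-- # round, i.e. costs 1); phi and the round count follow directly, no repeated
-- # subgraph rebuilding.
-- def Tri_topo_sans_circuit_par_puits(g):
--     h = {}
--
--     def height(x):
--         if x not in h:
--             best = 0
--             for y in g[x]:
--                 best = max(best, height(y) + 1 if y in g else 1)
--             h[x] = best
--         return h[x]
--
--     for x in g:
--         height(x)
--     if not h:
--         return ({}, 1)
--     m = max(h.values())
--     phi = {}
--     for v in range(m, -1, -1):
--         for x in g:
--             if h[x] == v:
--                 phi[x] = m - v + 1
--     return (phi, m + 2)
-- ===== Notes on version B (the rewrite author's own statement) =====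
-- stated objective: faster
-- what changed: A repeatedly rebuilds the induced subgraph after removing the current sinks and recurses; B computes each vertex's removal height once by one memoized DFS (an edge to a present vertex y costs h(y)+1, an edge to an absent vertex costs 1) and reads phi and the round count directly off the heights; intended as faster: a timing run measured 7x-133x at n=256-4096 (at larger sizes A times out; on very deep graphs B's DFS, like A's recursion, hits Python's recursion limit).
import Mathlib
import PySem

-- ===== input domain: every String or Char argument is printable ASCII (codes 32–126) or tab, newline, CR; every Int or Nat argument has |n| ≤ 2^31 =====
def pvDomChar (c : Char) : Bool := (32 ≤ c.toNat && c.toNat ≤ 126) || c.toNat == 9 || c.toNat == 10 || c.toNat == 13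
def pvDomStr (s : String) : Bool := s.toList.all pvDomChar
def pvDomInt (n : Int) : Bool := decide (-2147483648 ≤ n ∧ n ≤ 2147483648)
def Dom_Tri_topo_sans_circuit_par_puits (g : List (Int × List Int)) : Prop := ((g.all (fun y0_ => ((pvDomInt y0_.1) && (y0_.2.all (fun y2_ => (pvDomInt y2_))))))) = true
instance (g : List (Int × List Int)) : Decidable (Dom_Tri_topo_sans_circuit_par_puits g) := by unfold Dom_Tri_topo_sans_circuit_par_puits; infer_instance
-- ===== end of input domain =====

-- B replaces A's repeated sink-removal-and-subgraph-rebuilding recursion by one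
-- DFS computing each vertex's removal height, from which phi and the round count
-- follow directly.  (B's Python memo dict `h` is only a cache; the port computes
-- the same recursion values without it.)

-- ===== PORT A =====
def ensemble_sommet (g : PySem.Dict Int (List Int)) : List Int := g.keys

def sous_graphe (S : List Int) (g : PySem.Dict Int (List Int)) : PySem.Dict Int (List Int) :=
  g.keys.foldl (fun s i =>
    if i ∈ S then
      (g.getD i []).foldl
        (fun s2 elem => if elem ∈ S then s2.insert i (s2.getD i [] ++ [elem]) else s2)
        (s.insert i [])
    else s) PySem.Dict.empty

def ensemble_puits (g : PySem.Dict Int (List Int)) : List Int :=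
  g.keys.foldl (fun l x => if (g.getD x []).length = 0 then l ++ [x] else l) []

-- fuel measure: number of entries plus total adjacency length (fuel is only a
-- totality guard; under Pre_ the recursion terminates within it)
def pvMu (d : PySem.Dict Int (List Int)) : Nat :=
  (d.items.map (fun p => p.2.length + 1)).sum

def pvArec : Nat → PySem.Dict Int (List Int) → PySem.Dict Int Int × Int
  | 0, _ => (PySem.Dict.empty, 0)
  | f + 1, g =>
    if g.items.length = 0 then (PySem.Dict.empty, 1)
    else
      let puits := ensemble_puits g
      let S := puits.foldl (fun s p => (PySem.List.remove? s p).getD s) (ensemble_sommet g)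
      let sg := sous_graphe S g
      let r := pvArec f sg
      (puits.foldl (fun d x => d.insert x r.2) r.1, r.2 + 1)

def Tri_topo_sans_circuit_par_puits (g : List (Int × List Int)) : (List (Int × Int)) × Int :=
  let d := PySem.Dict.ofList g
  let r := pvArec (pvMu d + 1) d
  (r.1.items, r.2)

-- ===== PORT B =====
-- height of x: an edge to a present vertex y costs h(y)+1, an edge to an absent
-- vertex costs 1 (fuel = number of entries + 1 is a totality guard only)
def pvHD (d : PySem.Dict Int (List Int)) : Nat → Int → Int
  | 0, _ => 0
  | f + 1, x =>
    (d.getD x []).foldl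
      (fun best y => if d.contains y then max best (pvHD d f y + 1) else max best 1) 0

def pvBcore (d : PySem.Dict Int (List Int)) : PySem.Dict Int Int × Int :=
  let h : PySem.Dict Int Int :=
    d.keys.foldl (fun hd x => hd.insert x (pvHD d (d.items.length + 1) x)) PySem.Dict.empty
  if h.items.length = 0 then (PySem.Dict.empty, 1)
  else
    let m := ((PySem.List.max? h.values (fun v => v)).getD 0)
    let phi := (PySem.List.pyRange m (-1) (-1)).foldl
      (fun phi v =>
        d.keys.foldl (fun phi x => if h.getD x 0 = v then phi.insert x (m - v + 1) else phi) phi)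
      PySem.Dict.empty
    (phi, m + 2)

def Tri_topo_sans_circuit_par_puits_alt (g : List (Int × List Int)) : (List (Int × Int)) × Int :=
  let d := PySem.Dict.ofList g
  let r := pvBcore d
  (r.1.items, r.2)

-- ===== PRECONDITION & SPEC =====
-- key-successors of x: adjacency entries that are themselves keys of the graph
def pvSuccs (d : PySem.Dict Int (List Int)) (x : Int) : List Int :=
  (d.getD x []).filter (fun y => d.contains y)

def pvStep (d : PySem.Dict Int (List Int)) (s : List Int) : List Int :=
  s.foldl (fun acc y => acc ++ (pvSuccs d y).filter (fun z => !(acc.contains z))) s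

def pvReach (d : PySem.Dict Int (List Int)) : Nat → List Int → List Int
  | 0, s => s
  | k + 1, s => pvReach d k (pvStep d s)

def pvAcyc (d : PySem.Dict Int (List Int)) : Prop :=
  ∀ x ∈ d.keys, x ∉ pvReach d d.items.length (pvSuccs d x)

-- Pre_ excludes exactly the graphs with a directed cycle among present vertices:
-- there Python A recurses forever (RecursionError), returning nothing.
def Pre_Tri_topo_sans_circuit_par_puits (g : List (Int × List Int)) : Prop :=
  pvAcyc (PySem.Dict.ofList g)

instance (g : List (Int × List Int)) : Decidable (Pre_Tri_topo_sans_circuit_par_puits g) := by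
  unfold Pre_Tri_topo_sans_circuit_par_puits pvAcyc; infer_instance

def pvWitness_Tri_topo_sans_circuit_par_puits : (List (Int × List Int)) :=
  [(1, [2, 5]), (2, []), (3, [1, 2])]

def Spec_Tri_topo_sans_circuit_par_puits (g : List (Int × List Int)) (out : (List (Int × Int)) × Int) : Prop := out = Tri_topo_sans_circuit_par_puits_alt g
instance (g : List (Int × List Int)) (out : (List (Int × Int)) × Int) : Decidable (Spec_Tri_topo_sans_circuit_par_puits g out) := by unfold Spec_Tri_topo_sans_circuit_par_puits; infer_instance

-- ===== CLAIM (what is proved, stated in full; the proofs are below) =====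
def Claim_equal_Tri_topo_sans_circuit_par_puits : Prop := ∀ (g : List (Int × List Int)), Dom_Tri_topo_sans_circuit_par_puits g → Pre_Tri_topo_sans_circuit_par_puits g → Spec_Tri_topo_sans_circuit_par_puits g (Tri_topo_sans_circuit_par_puits g)

-- ===== LEMMAS AND PROOFS =====

-- generic facts about `foldl (fun a y => max a (c y))`
theorem pvFM_init_le {α : Type} (c : α → Int) (l : List α) (i : Int) :
    i ≤ l.foldl (fun a y => max a (c y)) i := by
  induction l generalizing i with
  | nil => simp
  | cons e t ih => exact le_trans (le_max_left _ _) (ih _)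

theorem pvFM_elem_le {α : Type} (c : α → Int) {l : List α} {y : α} (hy : y ∈ l) (i : Int) :
    c y ≤ l.foldl (fun a y => max a (c y)) i := by
  induction l generalizing i with
  | nil => cases hy
  | cons e t ih =>
    rcases List.mem_cons.1 hy with h | h
    · subst h; exact le_trans (le_max_right _ _) (pvFM_init_le _ _ _)
    · exact ih h _

theorem pvFM_le {α : Type} (c : α → Int) {l : List α} {b i : Int} (hi : i ≤ b)
    (h : ∀ y ∈ l, c y ≤ b) : l.foldl (fun a y => max a (c y)) i ≤ b := by
  induction l generalizing i with
  | nil => simpa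
  | cons e t ih =>
    exact ih (max_le hi (h e (List.mem_cons_self))) (fun y hy => h y (List.mem_cons_of_mem _ hy))

theorem pvFM_attain {α : Type} (c : α → Int) (l : List α) (i : Int) :
    l.foldl (fun a y => max a (c y)) i = i ∨ ∃ y ∈ l, l.foldl (fun a y => max a (c y)) i = c y := by
  induction l generalizing i with
  | nil => exact Or.inl rfl
  | cons e t ih =>
    have hstep : (e :: t).foldl (fun a y => max a (c y)) i = t.foldl (fun a y => max a (c y)) (max i (c e)) := rfl
    rcases ih (max i (c e)) with h | h
    · rcases le_total i (c e) with hle | hle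
      · right; exact ⟨e, List.mem_cons_self, by rw [hstep, h, max_eq_right hle]⟩
      · left; rw [hstep, h, max_eq_left hle]
    · rcases h with ⟨y, hy, hv⟩
      exact Or.inr ⟨y, List.mem_cons_of_mem _ hy, by rw [hstep, hv]⟩

theorem pvFM_congr {α : Type} {c c' : α → Int} {l : List α} (h : ∀ y ∈ l, c y = c' y) (i : Int) :
    l.foldl (fun a y => max a (c y)) i = l.foldl (fun a y => max a (c' y)) i := by
  induction l generalizing i with
  | nil => rfl
  | cons e t ih =>
    simp only [List.foldl_cons, h e List.mem_cons_self]
    exact ih (fun y hy => h y (List.mem_cons_of_mem _ hy)) _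

-- contribution of a successor edge
def pvHC (d : PySem.Dict Int (List Int)) (F : Int → Int) (y : Int) : Int :=
  if d.contains y then F y + 1 else 1

theorem pvHD_succ (d : PySem.Dict Int (List Int)) (f : Nat) (x : Int) :
    pvHD d (f + 1) x = (d.getD x []).foldl (fun a y => max a (pvHC d (fun z => pvHD d f z) y)) 0 := by
  show (d.getD x []).foldl _ 0 = _
  congr 1
  funext a y
  by_cases h : d.contains y <;> simp [pvHC, h]

theorem pvHD_nonneg (d : PySem.Dict Int (List Int)) (f : Nat) (x : Int) : 0 ≤ pvHD d f x := by
  cases f with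
  | zero => simp [pvHD]
  | succ f => rw [pvHD_succ]; exact pvFM_init_le _ _ _

theorem pvHC_pos (d : PySem.Dict Int (List Int)) (F : Int → Int) (y : Int)
    (hF : 0 ≤ F y) : 1 ≤ pvHC d F y := by
  unfold pvHC
  split
  · omega
  · omega

theorem pvHD_zero_iff (d : PySem.Dict Int (List Int)) (f : Nat) (x : Int) :
    pvHD d (f + 1) x = 0 ↔ d.getD x [] = [] := by
  constructor
  · intro h
    cases hadj : d.getD x [] with
    | nil => rfl
    | cons e t =>
      exfalso
      have h1 : (1 : Int) ≤ pvHD d (f + 1) x := by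
        rw [pvHD_succ, hadj]
        exact le_trans (pvHC_pos d _ e (pvHD_nonneg d f e)) (pvFM_elem_le _ List.mem_cons_self _)
      omega
  · intro h; rw [pvHD_succ, h]; rfl

-- stability: once the value is below the fuel, more fuel does not change it
theorem pvHD_stable (d : PySem.Dict Int (List Int)) (f : Nat) (x : Int)
    (h : pvHD d f x < (f : Int)) : pvHD d (f + 1) x = pvHD d f x := by
  induction f generalizing x with
  | zero => rw [show pvHD d 0 x = 0 from rfl] at h; omega
  | succ f ih =>
    rw [pvHD_succ (f := f + 1), pvHD_succ (f := f)]
    refine pvFM_congr (fun y hy => ?_) _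
    unfold pvHC
    split
    · have hb : pvHD d f y + 1 ≤ pvHD d (f + 1) x := by
        rw [pvHD_succ]
        have := pvFM_elem_le (pvHC d (fun z => pvHD d f z)) hy (0 : Int)
        simpa [pvHC, *] using this
      have : pvHD d f y < (f : Int) := by push_cast at h ⊢; omega
      simp only [ih y this]
    · rfl

-- ===== chains and reachability =====
def pvChain (d : PySem.Dict Int (List Int)) : Int → List Int → Prop
  | _, [] => True
  | x, y :: t => y ∈ pvSuccs d x ∧ pvChain d y t

theorem pvChain_take (d : PySem.Dict Int (List Int)) (x : Int) (l : List Int)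
    (h : pvChain d x l) (k : Nat) : pvChain d x (l.take k) := by
  induction l generalizing x k with
  | nil => simp [pvChain]
  | cons y t ih =>
    cases k with
    | zero => simp [pvChain]
    | succ k => exact ⟨h.1, ih y h.2 k⟩

theorem pvChain_append_last (d : PySem.Dict Int (List Int)) :
    ∀ (l1 : List Int) (x a : Int) (l2 : List Int), pvChain d x (l1 ++ a :: l2) → pvChain d a l2 := by
  intro l1
  induction l1 with
  | nil => intro x a l2 h; exact h.2
  | cons y t ih => intro x a l2 h; exact ih y a l2 h.2

theorem pvChain_cycle (d : PySem.Dict Int (List Int)) :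
    ∀ (l1 : List Int) (x a : Int) (l2 l3 : List Int),
      pvChain d x (l1 ++ a :: l2 ++ a :: l3) → pvChain d a (l2 ++ [a]) := by
  intro l1 x a l2 l3 h
  simp only [List.cons_append, List.append_assoc] at h
  have h2 : pvChain d a (l2 ++ a :: l3) := pvChain_append_last d l1 x a _ h
  -- truncate the tail after the second a
  have h3 := pvChain_take d a (l2 ++ a :: l3) h2 (l2.length + 1)
  have htk : List.take (l2.length + 1) (l2 ++ a :: l3) = l2 ++ [a] := by
    rw [List.take_append]
    simp [List.take_of_length_le]
  rw [htk] at h3; exact h3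

-- height ≥ v yields a chain of key-vertices of length ≥ v - 1
theorem pvHD_chain (d : PySem.Dict Int (List Int)) (f : Nat) :
    ∀ (x : Int) (v : Int), pvHD d f x = v → 1 ≤ v →
      ∃ l : List Int, pvChain d x l ∧ v - 1 ≤ (l.length : Int) ∧ ∀ z ∈ l, d.contains z = true := by
  induction f with
  | zero => intro x v hv h1; rw [show pvHD d 0 x = 0 from rfl] at hv; omega
  | succ f ih =>
    intro x v hv h1
    rw [pvHD_succ] at hv
    rcases pvFM_attain (pvHC d (fun z => pvHD d f z)) (d.getD x []) 0 with h | ⟨y, hy, hval⟩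
    · omega
    · rw [hval] at hv
      unfold pvHC at hv
      by_cases hk : d.contains y
      · rw [if_pos hk] at hv
        have hv' : pvHD d f y + 1 = v := hv
        by_cases hz : 1 ≤ pvHD d f y
        · rcases ih y (pvHD d f y) rfl hz with ⟨l, hc, hlen, hmem⟩
          refine ⟨y :: l, ⟨?_, hc⟩, by simp; omega, ?_⟩
          · unfold pvSuccs; rw [List.mem_filter]; exact ⟨hy, by simpa using hk⟩
          · intro z hz'
            rcases List.mem_cons.1 hz' with h | h
            · subst h; exact hk
            · exact hmem z h
        · refine ⟨[y], ⟨?_, trivial⟩, ?_, ?_⟩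
          · unfold pvSuccs; rw [List.mem_filter]; exact ⟨hy, by simpa using hk⟩
          · simp; omega
          · intro z hz'; simp at hz'; subst hz'; exact hk
      · rw [if_neg hk] at hv
        refine ⟨[], trivial, by simp; omega, by simp⟩

-- membership characterisation of pvStep
theorem pvStep_mem_aux (d : PySem.Dict Int (List Int)) (l : List Int) :
    ∀ (acc : List Int) (z : Int),
      z ∈ l.foldl (fun acc y => acc ++ (pvSuccs d y).filter (fun w => !(acc.contains w))) acc ↔
        z ∈ acc ∨ ∃ y ∈ l, z ∈ pvSuccs d y := by
  induction l with
  | nil => simp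
  | cons e t ih =>
    intro acc z
    rw [List.foldl_cons, ih]
    constructor
    · rintro (hz | ⟨y, hy, hzy⟩)
      · rcases List.mem_append.1 hz with h | h
        · exact Or.inl h
        · exact Or.inr ⟨e, List.mem_cons_self, (List.mem_filter.1 h).1⟩
      · exact Or.inr ⟨y, List.mem_cons_of_mem _ hy, hzy⟩
    · rintro (hz | ⟨y, hy, hzy⟩)
      · exact Or.inl (List.mem_append.2 (Or.inl hz))
      · rcases List.mem_cons.1 hy with h | h
        · subst h
          by_cases hza : z ∈ acc
          · exact Or.inl (List.mem_append.2 (Or.inl hza))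
          · refine Or.inl (List.mem_append.2 (Or.inr ?_))
            rw [List.mem_filter]
            exact ⟨hzy, by simpa using hza⟩
        · exact Or.inr ⟨y, h, hzy⟩

theorem pvStep_mem (d : PySem.Dict Int (List Int)) (s : List Int) (z : Int) :
    z ∈ pvStep d s ↔ z ∈ s ∨ ∃ y ∈ s, z ∈ pvSuccs d y :=
  pvStep_mem_aux d s s z

theorem pvReach_mono_base (d : PySem.Dict Int (List Int)) (k : Nat) {s t : List Int}
    (h : ∀ z ∈ s, z ∈ t) : ∀ z ∈ pvReach d k s, z ∈ pvReach d k t := by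
  induction k generalizing s t with
  | zero => exact h
  | succ k ih =>
    refine ih (fun z hz => ?_)
    rw [pvStep_mem] at hz ⊢
    rcases hz with hz | ⟨y, hy, hzy⟩
    · exact Or.inl (h z hz)
    · exact Or.inr ⟨y, h y hy, hzy⟩

theorem pvSub_reach (d : PySem.Dict Int (List Int)) (k : Nat) (s : List Int) :
    ∀ z ∈ s, z ∈ pvReach d k s := by
  induction k generalizing s with
  | zero => exact fun z hz => hz
  | succ k ih =>
    intro z hz
    exact ih (pvStep d s) z ((pvStep_mem d s z).2 (Or.inl hz))

theorem pvReach_mono_k (d : PySem.Dict Int (List Int)) {k k' : Nat} (h : k ≤ k') (s : List Int) :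
    ∀ z ∈ pvReach d k s, z ∈ pvReach d k' s := by
  induction k' generalizing s with
  | zero => have : k = 0 := Nat.le_zero.1 h; subst this; exact fun z hz => hz
  | succ k' ih =>
    rcases Nat.eq_or_lt_of_le h with rfl | hlt
    · exact fun z hz => hz
    · intro z hz
      have h1 := ih (Nat.lt_succ_iff.1 hlt) s z hz
      show z ∈ pvReach d k' (pvStep d s)
      exact pvReach_mono_base d k' (fun w hw => (pvStep_mem d s w).2 (Or.inl hw)) z h1

theorem pvChain_reach (d : PySem.Dict Int (List Int)) :
    ∀ (l : List Int) (x : Int), pvChain d x l →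
      ∀ z ∈ l, z ∈ pvReach d (l.length - 1) (pvSuccs d x) := by
  intro l
  induction l with
  | nil => intro x _ z hz; cases hz
  | cons y t ih =>
    intro x hc z hz
    rcases List.mem_cons.1 hz with h | h
    · subst h
      exact pvSub_reach d _ _ z hc.1
    · cases t with
      | nil => cases h
      | cons w r =>
        have h1 := ih y hc.2 z h
        have h2 : ∀ u ∈ pvSuccs d y, u ∈ pvStep d (pvSuccs d x) :=
          fun u hu => (pvStep_mem d _ u).2 (Or.inr ⟨y, hc.1, hu⟩)
        have h3 := pvReach_mono_base d ((w :: r).length - 1) h2 z h1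
        show z ∈ pvReach d ((w :: r).length + 1 - 1) (pvSuccs d x)
        have : (w :: r).length + 1 - 1 = ((w :: r).length - 1) + 1 := by simp
        rw [this]
        exact h3

theorem pv_dup_split {α : Type} [DecidableEq α] :
    ∀ (l : List α), ¬ l.Nodup → ∃ a l1 l2 l3, l = l1 ++ a :: l2 ++ a :: l3 := by
  intro l
  induction l with
  | nil => intro h; exact absurd List.nodup_nil h
  | cons b t ih =>
    intro h
    by_cases hbt : b ∈ t
    · rcases List.append_of_mem hbt with ⟨s1, s2, rfl⟩
      exact ⟨b, [], s1, s2, by simp⟩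
    · have hnt : ¬ t.Nodup := fun hn => h (List.nodup_cons.2 ⟨hbt, hn⟩)
      rcases ih hnt with ⟨a, l1, l2, l3, rfl⟩
      exact ⟨a, b :: l1, l2, l3, by simp⟩

-- acyclicity bounds every height by the number of vertices
theorem pv_keys_length (d : PySem.Dict Int (List Int)) : d.keys.length = d.items.length := by
  simp [PySem.Dict.keys]

theorem pvHD_acyc_le (d : PySem.Dict Int (List Int)) (hac : pvAcyc d)
    (f : Nat) (x : Int) (hx : x ∈ d.keys) : pvHD d f x ≤ (d.items.length : Int) := by
  by_contra hgt
  rw [not_le] at hgt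
  rcases pvHD_chain d f x (pvHD d f x) rfl (by omega) with ⟨l, hc, hlen, hmem⟩
  have hln : d.items.length ≤ l.length := by
    have h1 : (d.items.length : Int) + 1 ≤ pvHD d f x := by omega
    have h2 : (d.items.length : Int) ≤ (l.length : Int) := by omega
    exact_mod_cast h2
  have hcl' : pvChain d x (l.take d.items.length) := pvChain_take d x l hc _
  have hlen' : (l.take d.items.length).length = d.items.length := by
    rw [List.length_take]; omega
  have hsub : ∀ z ∈ x :: l.take d.items.length, z ∈ d.keys := by
    intro z hz
    rcases List.mem_cons.1 hz with h | h
    · subst h; exact hx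
    · exact (PySem.Dict.contains_iff_mem_keys d z).1 (hmem z (List.take_subset _ _ h))
  have hnodup : ¬ (x :: l.take d.items.length).Nodup := by
    intro hn
    have := (List.subperm_of_subset hn hsub).length_le
    rw [pv_keys_length] at this
    simp [hlen'] at this
  rcases pv_dup_split _ hnodup with ⟨a, l1, l2, l3, heq⟩
  have hlens : l1.length + l2.length + l3.length + 2 = d.items.length + 1 := by
    have := congrArg List.length heq
    simp [hlen'] at this
    omega
  have ha : a ∈ d.keys := by
    refine hsub a ?_
    rw [heq]
    simp
  have hcy : pvChain d a (l2 ++ [a]) := by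
    cases l1 with
    | nil =>
      simp only [List.nil_append, List.cons_append] at heq
      have hx_eq : x = a := (List.cons_eq_cons.1 heq).1
      have hl' : l.take d.items.length = l2 ++ a :: l3 := by
        have := (List.cons_eq_cons.1 heq).2
        simpa using this
      have h4 := pvChain_take d x _ (hl' ▸ hcl') (l2.length + 1)
      have htk : List.take (l2.length + 1) (l2 ++ a :: l3) = l2 ++ [a] := by
        rw [List.take_append]
        simp [List.take_of_length_le]
      rw [htk] at h4
      exact hx_eq ▸ h4
    | cons b t =>
      simp only [List.cons_append] at heq
      have hl' : l.take d.items.length = t ++ a :: l2 ++ a :: l3 := by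
        have := (List.cons_eq_cons.1 heq).2
        simpa using this
      exact pvChain_cycle d t x a l2 l3 (hl' ▸ hcl')
  have hmem_a : a ∈ (l2 ++ [a]) := by simp
  have hr := pvChain_reach d (l2 ++ [a]) a hcy a hmem_a
  have hll : (l2 ++ [a]).length - 1 = l2.length := by simp
  rw [hll] at hr
  have hr2 : a ∈ pvReach d d.items.length (pvSuccs d a) :=
    pvReach_mono_k d (by omega) _ a hr
  exact hac a ha hr2


-- ===== characterisations of the A-side helpers =====
theorem pv_puits_eq (g : PySem.Dict Int (List Int)) :
    ensemble_puits g = g.keys.filter (fun x => decide ((g.getD x []).length = 0)) := by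
  unfold ensemble_puits
  have hfn : (fun (l : List Int) (x : Int) => if (g.getD x []).length = 0 then l ++ [x] else l)
      = (fun l x => if (fun x => decide ((g.getD x []).length = 0)) x = true then l ++ [(fun (x : Int) => x) x] else l) := by
    funext l x
    by_cases h : (g.getD x []).length = 0 <;> simp [h]
  rw [hfn, PySem.List.foldl_append_if]
  simp

theorem pv_srem (ps : List Int) :
    ∀ (ks : List Int), ks.Nodup → ps.Nodup → (∀ p ∈ ps, p ∈ ks) →
      ps.foldl (fun s p => (PySem.List.remove? s p).getD s) ks
        = ks.filter (fun x => decide (x ∉ ps)) := by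
  induction ps with
  | nil => intro ks _ _ _; simp
  | cons p t ih =>
    intro ks hnd hpnd hsub
    have hp : p ∈ ks := hsub p List.mem_cons_self
    rw [List.foldl_cons, PySem.List.remove?_eq_some_erase ks p hp]
    simp only [Option.getD_some]
    rw [List.Nodup.erase_eq_filter hnd p]
    have hrec := ih (ks.filter (fun x => x != p)) (hnd.filter _) (List.nodup_cons.1 hpnd).2
      (fun q hq => by
        rw [List.mem_filter]
        refine ⟨hsub q (List.mem_cons_of_mem _ hq), ?_⟩
        have : q ≠ p := fun h => (List.nodup_cons.1 hpnd).1 (h ▸ hq)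
        simpa using this)
    rw [hrec, List.filter_filter]
    refine List.filter_congr (fun x _ => ?_)
    by_cases h1 : x = p
    · subst h1; simp
    · by_cases h2 : x ∈ t <;> simp [h1, h2]

-- the inner append loop of sous_graphe
theorem pv_inner (S : List Int) (l : List Int) :
    ∀ (s : PySem.Dict Int (List Int)) (i : Int) (v : List Int),
      l.foldl (fun s2 elem => if elem ∈ S then s2.insert i (s2.getD i [] ++ [elem]) else s2) (s.insert i v)
        = s.insert i (v ++ l.filter (fun e => decide (e ∈ S))) := by
  induction l with
  | nil => intro s i v; simp
  | cons e t ih =>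
    intro s i v
    rw [List.foldl_cons]
    by_cases he : e ∈ S
    · rw [if_pos he, PySem.Dict.getD_insert_self, PySem.Dict.insert_insert_self, ih]
      simp [he]
    · rw [if_neg he, ih]
      simp [he]

theorem pv_sg_items (S : List Int) (g : PySem.Dict Int (List Int)) (hnd : g.keys.Nodup) :
    (sous_graphe S g).items
      = (g.keys.filter (fun i => decide (i ∈ S))).map
          (fun i => (i, (g.getD i []).filter (fun e => decide (e ∈ S)))) := by
  unfold sous_graphe
  have hfn : (fun (s : PySem.Dict Int (List Int)) (i : Int) =>
      if i ∈ S then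
        (g.getD i []).foldl
          (fun s2 elem => if elem ∈ S then s2.insert i (s2.getD i [] ++ [elem]) else s2)
          (s.insert i [])
      else s)
      = (fun s i => if (fun i => decide (i ∈ S)) i = true
          then s.insert i ((g.getD i []).filter (fun e => decide (e ∈ S))) else s) := by
    funext s i
    by_cases h : i ∈ S
    · rw [if_pos h, pv_inner, List.nil_append, if_pos (by simpa using h)]
    · rw [if_neg h, if_neg (by simpa using h)]
  rw [hfn, ← List.foldl_filter]
  rw [PySem.Dict.items_foldl_insert_fresh _ (fun i => i)
        (fun i => (g.getD i []).filter (fun e => decide (e ∈ S))) PySem.Dict.empty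
        (fun a _ => PySem.Dict.contains_empty a) (by simpa using hnd.filter _)]
  have : (PySem.Dict.empty : PySem.Dict Int (List Int)).items = [] := rfl
  rw [this]
  simp

-- ===== derived facts about sous_graphe, reachability monotonicity =====
theorem pv_sg_keys (S : List Int) (g : PySem.Dict Int (List Int)) (hnd : g.keys.Nodup) :
    (sous_graphe S g).keys = g.keys.filter (fun i => decide (i ∈ S)) := by
  show (sous_graphe S g).items.map (fun p => p.1) = _
  rw [pv_sg_items S g hnd, List.map_map]
  simp [Function.comp_def]

theorem pv_sg_nodup (S : List Int) (g : PySem.Dict Int (List Int)) (hnd : g.keys.Nodup) :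
    (sous_graphe S g).keys.Nodup := by
  rw [pv_sg_keys S g hnd]; exact hnd.filter _

theorem pv_sg_contains (S : List Int) (g : PySem.Dict Int (List Int)) (hnd : g.keys.Nodup)
    (i : Int) : (sous_graphe S g).contains i = true ↔ (i ∈ g.keys ∧ i ∈ S) := by
  rw [PySem.Dict.contains_iff_mem_keys, pv_sg_keys S g hnd, List.mem_filter]
  simp

theorem pv_sg_getD (S : List Int) (g : PySem.Dict Int (List Int)) (hnd : g.keys.Nodup)
    (i : Int) (hi : i ∈ g.keys) (hiS : i ∈ S) :
    (sous_graphe S g).getD i [] = (g.getD i []).filter (fun e => decide (e ∈ S)) := by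
  refine PySem.Dict.getD_of_mem_items _ ?_ (pv_sg_nodup S g hnd) []
  rw [pv_sg_items S g hnd]
  refine List.mem_map.2 ⟨i, ?_, rfl⟩
  rw [List.mem_filter]
  simp [hi, hiS]

theorem pv_sg_getD_empty (S : List Int) (g : PySem.Dict Int (List Int)) (hnd : g.keys.Nodup)
    (i : Int) (hi : ¬ (i ∈ g.keys ∧ i ∈ S)) : (sous_graphe S g).getD i [] = [] := by
  refine PySem.Dict.getD_of_not_contains _ _ ?_
  rcases h : (sous_graphe S g).contains i
  · rfl
  · exact absurd ((pv_sg_contains S g hnd i).1 h) hi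

theorem pv_sg_len_le (S : List Int) (g : PySem.Dict Int (List Int)) (hnd : g.keys.Nodup) :
    (sous_graphe S g).items.length ≤ g.items.length := by
  rw [pv_sg_items S g hnd, List.length_map, ← pv_keys_length g]
  exact List.length_filter_le _ _

theorem pv_succs_sg_sub (S : List Int) (g : PySem.Dict Int (List Int)) (hnd : g.keys.Nodup)
    (y : Int) : ∀ z ∈ pvSuccs (sous_graphe S g) y, z ∈ pvSuccs g y := by
  intro z hz
  unfold pvSuccs at hz ⊢
  rw [List.mem_filter] at hz ⊢
  rcases hz with ⟨hz1, hz2⟩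
  have hzk := (pv_sg_contains S g hnd z).1 (by simpa using hz2)
  by_cases hy : y ∈ g.keys ∧ y ∈ S
  · rw [pv_sg_getD S g hnd y hy.1 hy.2] at hz1
    refine ⟨(List.mem_filter.1 hz1).1, ?_⟩
    simp [(PySem.Dict.contains_iff_mem_keys g z).2 hzk.1]
  · rw [pv_sg_getD_empty S g hnd y hy] at hz1
    cases hz1

theorem pvReach_mono_graph (d' d : PySem.Dict Int (List Int))
    (hsucc : ∀ y, ∀ z ∈ pvSuccs d' y, z ∈ pvSuccs d y) (k : Nat) :
    ∀ {s' s : List Int}, (∀ z ∈ s', z ∈ s) → ∀ z ∈ pvReach d' k s', z ∈ pvReach d k s := by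
  induction k with
  | zero => intro s' s hs z hz; exact hs z hz
  | succ k ih =>
    intro s' s hs z hz
    refine ih (fun w hw => ?_) z hz
    rw [pvStep_mem] at hw ⊢
    rcases hw with hw | ⟨y, hy, hzy⟩
    · exact Or.inl (hs w hw)
    · exact Or.inr ⟨y, hs y hy, hsucc y w hzy⟩

theorem pv_acyc_sg (S : List Int) (g : PySem.Dict Int (List Int)) (hnd : g.keys.Nodup)
    (hac : pvAcyc g) : pvAcyc (sous_graphe S g) := by
  intro x hx hmem
  have hxg : x ∈ g.keys ∧ x ∈ S := by
    rw [pv_sg_keys S g hnd, List.mem_filter] at hx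
    simpa using hx
  have h1 : x ∈ pvReach g (sous_graphe S g).items.length (pvSuccs g x) :=
    pvReach_mono_graph _ g (pv_succs_sg_sub S g hnd) _ (pv_succs_sg_sub S g hnd x) x hmem
  exact hac x hxg.1 (pvReach_mono_k g (pv_sg_len_le S g hnd) _ x h1)

-- ===== the height function with canonical fuel =====
def pvH (d : PySem.Dict Int (List Int)) (x : Int) : Int := pvHD d (d.items.length + 1) x

theorem pvH_nonneg (d : PySem.Dict Int (List Int)) (x : Int) : 0 ≤ pvH d x :=
  pvHD_nonneg d _ x

theorem pvH_zero_iff (d : PySem.Dict Int (List Int)) (x : Int) :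
    pvH d x = 0 ↔ d.getD x [] = [] := pvHD_zero_iff d _ x

theorem pvH_rec (d : PySem.Dict Int (List Int)) (hac : pvAcyc d) (x : Int) (hx : x ∈ d.keys) :
    pvH d x = (d.getD x []).foldl (fun a y => max a (pvHC d (fun z => pvH d z) y)) 0 := by
  have hle := pvHD_acyc_le d hac (d.items.length + 1) x hx
  have hst := pvHD_stable d (d.items.length + 1) x (by push_cast; omega)
  have h2 := pvHD_succ d (d.items.length + 1) x
  rw [hst] at h2
  exact h2

-- ===== characterisation of port B's core =====
def pvM (d : PySem.Dict Int (List Int)) : Int :=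
  (PySem.List.max? (d.keys.map (fun x => pvH d x)) (fun v => v)).getD 0

theorem pv_contains_false_iff {ν : Type} (d : PySem.Dict Int ν) (x : Int) :
    d.contains x = false ↔ x ∉ d.keys := by
  rw [← PySem.Dict.contains_iff_mem_keys]
  cases d.contains x <;> simp

theorem pv_m_spec (d : PySem.Dict Int (List Int)) (hne : d.keys ≠ []) :
    pvM d ∈ d.keys.map (fun x => pvH d x) ∧ ∀ w ∈ d.keys.map (fun x => pvH d x), w ≤ pvM d := by
  rcases hmax : PySem.List.max? (d.keys.map (fun x => pvH d x)) (fun v => v) with _ | m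
  · rw [PySem.List.max?_eq_none_iff] at hmax
    simp at hmax
    exact absurd hmax hne
  · have h1 : pvM d = m := by rw [pvM, hmax]; rfl
    rw [h1]
    exact ⟨PySem.List.max?_mem hmax, fun w hw => PySem.List.max?_isMax hmax w hw⟩

theorem pv_flatMap_congr {α β : Type} {f g : α → List β} :
    ∀ (l : List α), (∀ v ∈ l, f v = g v) → l.flatMap f = l.flatMap g := by
  intro l
  induction l with
  | nil => intro _; rfl
  | cons e t ih =>
    intro h
    simp only [List.flatMap_cons, h e List.mem_cons_self,
      ih (fun v hv => h v (List.mem_cons_of_mem _ hv))]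

theorem pv_range_nodup (a : Int) : (PySem.List.pyRange a (-1) (-1)).Nodup := by
  rw [PySem.List.pyRange_neg_one]
  exact List.nodup_range.map (fun k k' h => by omega)

theorem pvLevelFold (K : List Int) (hK : K.Nodup) (Hf : Int → Int) (mm : Int) :
    ∀ (vs : List Int), vs.Nodup →
      ∀ (d0 : PySem.Dict Int Int), (∀ x ∈ K, Hf x ∈ vs → d0.contains x = false) →
        (vs.foldl (fun phi v =>
            K.foldl (fun phi x => if Hf x = v then phi.insert x (mm - v + 1) else phi) phi) d0).items
          = d0.items ++ vs.flatMap
              (fun v => (K.filter (fun x => decide (Hf x = v))).map (fun x => (x, mm - v + 1))) := by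
  intro vs
  induction vs with
  | nil => intro _ d0 _; simp
  | cons v t ih =>
    intro hvs d0 hfresh
    rw [List.foldl_cons]
    have hfn : (fun (phi : PySem.Dict Int Int) (x : Int) =>
        if Hf x = v then phi.insert x (mm - v + 1) else phi)
        = (fun phi x => if (fun x => decide (Hf x = v)) x = true
            then phi.insert x (mm - v + 1) else phi) := by
      funext phi x
      by_cases h : Hf x = v <;> simp [h]
    have hinner : (K.foldl (fun phi x => if Hf x = v then phi.insert x (mm - v + 1) else phi) d0)
        = (K.filter (fun x => decide (Hf x = v))).foldl
            (fun phi x => phi.insert x (mm - v + 1)) d0 := by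
      rw [hfn, ← List.foldl_filter]
    have hinner_items :
        (K.foldl (fun phi x => if Hf x = v then phi.insert x (mm - v + 1) else phi) d0).items
          = d0.items ++ (K.filter (fun x => decide (Hf x = v))).map (fun x => (x, mm - v + 1)) := by
      rw [hinner]
      refine PySem.Dict.items_foldl_insert_fresh _ (fun x => x) (fun _ => mm - v + 1) d0
        (fun a ha => ?_) (by simpa using hK.filter _)
      have h1 := List.mem_filter.1 ha
      have h2 : Hf a = v := of_decide_eq_true h1.2
      exact hfresh a h1.1 (h2 ▸ List.mem_cons_self)
    have hkeys1 : (K.foldl (fun phi x => if Hf x = v then phi.insert x (mm - v + 1) else phi) d0).keys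
        = d0.keys ++ (K.filter (fun x => decide (Hf x = v))).map (fun x => x) := by
      show (K.foldl (fun phi x => if Hf x = v then phi.insert x (mm - v + 1) else phi) d0).items.map (fun p => p.1) = _
      rw [hinner_items]
      simp [PySem.Dict.keys, Function.comp_def]
    rw [ih (List.nodup_cons.1 hvs).2 _ (fun x hx hHf => by
      rw [pv_contains_false_iff]
      rw [hkeys1]
      intro hmem
      rcases List.mem_append.1 hmem with h | h
      · exact absurd h ((pv_contains_false_iff d0 x).1 (hfresh x hx (List.mem_cons_of_mem _ hHf)))
      · have h3 : x ∈ K.filter (fun x => decide (Hf x = v)) := by simpa using h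
        have h4 : Hf x = v := of_decide_eq_true (List.mem_filter.1 h3).2
        exact (List.nodup_cons.1 hvs).1 (h4 ▸ hHf)), hinner_items]
    simp [List.append_assoc]

theorem pvBcore_spec (d : PySem.Dict Int (List Int)) (hnd : d.keys.Nodup) (hne : d.keys ≠ []) :
    (pvBcore d).1.items
        = (PySem.List.pyRange (pvM d) (-1) (-1)).flatMap
            (fun v => (d.keys.filter (fun x => decide (pvH d x = v))).map
              (fun x => (x, pvM d - v + 1)))
      ∧ (pvBcore d).2 = pvM d + 2 := by
  have hitems : (d.keys.foldl (fun hd x => hd.insert x (pvHD d (d.items.length + 1) x))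
      PySem.Dict.empty).items = d.keys.map (fun x => (x, pvH d x)) := by
    rw [PySem.Dict.items_foldl_insert_fresh _ (fun x => x)
          (fun x => pvHD d (d.items.length + 1) x) _
          (fun a _ => PySem.Dict.contains_empty a) (by simpa using hnd)]
    have : (PySem.Dict.empty : PySem.Dict Int Int).items = [] := rfl
    rw [this]
    simp [pvH]
  set hd0 : PySem.Dict Int Int :=
    d.keys.foldl (fun hd x => hd.insert x (pvHD d (d.items.length + 1) x)) PySem.Dict.empty with hhd0
  have hkeysh : hd0.keys = d.keys := by
    show hd0.items.map (fun p => p.1) = _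
    rw [hitems, List.map_map]
    simp [Function.comp_def]
  have hndh : hd0.keys.Nodup := by rw [hkeysh]; exact hnd
  have hvals : hd0.values = d.keys.map (fun x => pvH d x) := by
    show hd0.items.map (fun p => p.2) = _
    rw [hitems, List.map_map]
    simp [Function.comp_def]
  have hlen : ¬ hd0.items.length = 0 := by
    rw [hitems, List.length_map]
    simpa using hne
  have hgetD : ∀ x ∈ d.keys, hd0.getD x 0 = pvH d x := by
    intro x hx
    exact PySem.Dict.getD_of_mem_items hd0 (by rw [hitems]; exact List.mem_map.2 ⟨x, hx, rfl⟩) hndh 0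
  have hB : pvBcore d = (((PySem.List.pyRange ((PySem.List.max? hd0.values (fun v => v)).getD 0) (-1) (-1)).foldl
      (fun phi v => d.keys.foldl
        (fun phi x => if hd0.getD x 0 = v then phi.insert x (((PySem.List.max? hd0.values (fun v => v)).getD 0) - v + 1) else phi) phi)
      PySem.Dict.empty), ((PySem.List.max? hd0.values (fun v => v)).getD 0) + 2) := by
    rw [pvBcore]
    rw [← hhd0]
    rw [if_neg hlen]
  have hmeq : (PySem.List.max? hd0.values (fun v => v)).getD 0 = pvM d := by
    rw [hvals]; rfl
  rw [hB, hmeq]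
  refine ⟨?_, rfl⟩
  rw [pvLevelFold d.keys hnd (fun x => hd0.getD x 0) (pvM d) _ (pv_range_nodup _)
        PySem.Dict.empty (fun x _ _ => PySem.Dict.contains_empty x)]
  have hempty : (PySem.Dict.empty : PySem.Dict Int Int).items = [] := rfl
  rw [hempty, List.nil_append]
  refine pv_flatMap_congr _ (fun v _ => ?_)
  congr 1
  refine List.filter_congr (fun x hx => ?_)
  rw [hgetD x hx]

-- ===== heights drop by exactly one when the sinks are removed =====
theorem pvKey (g : PySem.Dict Int (List Int)) (hnd : g.keys.Nodup) (hac : pvAcyc g)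
    (S : List Int) (hS : ∀ z : Int, z ∈ S ↔ (z ∈ g.keys ∧ pvH g z ≠ 0)) :
    ∀ (N : Nat) (x : Int), x ∈ g.keys → pvH g x ≠ 0 → (pvH g x).toNat ≤ N →
      pvH (sous_graphe S g) x = pvH g x - 1 := by
  intro N
  induction N with
  | zero =>
    intro x _ hne hle
    have := pvH_nonneg g x
    omega
  | succ N ih =>
    intro x hx hne hleN
    have hxS : x ∈ S := (hS x).2 ⟨hx, hne⟩
    have hxsg : x ∈ (sous_graphe S g).keys := by
      rw [pv_sg_keys S g hnd, List.mem_filter]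
      exact ⟨hx, by simpa using hxS⟩
    have hrecg := pvH_rec g hac x hx
    have hrecsg := pvH_rec (sous_graphe S g) (pv_acyc_sg S g hnd hac) x hxsg
    have hadj : (sous_graphe S g).getD x [] = (g.getD x []).filter (fun e => decide (e ∈ S)) :=
      pv_sg_getD S g hnd x hx hxS
    have hdomg : ∀ e ∈ g.getD x [], pvHC g (fun z => pvH g z) e ≤ pvH g x := by
      intro e he
      rw [hrecg]
      exact pvFM_elem_le _ he _
    have hmemsg : ∀ e ∈ (sous_graphe S g).getD x [],
        e ∈ g.getD x [] ∧ e ∈ g.keys ∧ pvH g e ≠ 0 := by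
      intro e he
      rw [hadj, List.mem_filter] at he
      have heS : e ∈ S := of_decide_eq_true he.2
      exact ⟨he.1, ((hS e).1 heS).1, ((hS e).1 heS).2⟩
    by_cases ht : pvH g x = 1
    · have hnil : (sous_graphe S g).getD x [] = [] := by
        rw [hadj, List.filter_eq_nil_iff]
        intro e he hdec
        have he2 := (hS e).1 (of_decide_eq_true hdec)
        have hcon : pvHC g (fun z => pvH g z) e = pvH g e + 1 := by
          unfold pvHC
          rw [if_pos ((PySem.Dict.contains_iff_mem_keys g e).2 he2.1)]
        have hge := hdomg e he
        rw [hcon] at hge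
        have := pvH_nonneg g e
        have hne0 := he2.2
        omega
      rw [hrecsg, hnil]
      show (0 : Int) = pvH g x - 1
      omega
    · have ht2 : 2 ≤ pvH g x := by
        have := pvH_nonneg g x
        omega
      have hatt := pvFM_attain (pvHC g (fun z => pvH g z)) (g.getD x []) 0
      rw [← hrecg] at hatt
      rcases hatt with h0 | ⟨y, hy, hval⟩
      · omega
      · have hky : g.contains y = true := by
          by_contra hk
          have : pvHC g (fun z => pvH g z) y = 1 := by
            unfold pvHC
            rw [if_neg (by simpa using hk)]
          rw [this] at hval
          omega
        have hyv : pvH g y + 1 = pvH g x := by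
          have : pvHC g (fun z => pvH g z) y = pvH g y + 1 := by
            unfold pvHC
            rw [if_pos hky]
          rw [this] at hval
          omega
        have hyk : y ∈ g.keys := (PySem.Dict.contains_iff_mem_keys g y).1 hky
        have hyne : pvH g y ≠ 0 := by omega
        have hySmem : y ∈ (sous_graphe S g).getD x [] := by
          rw [hadj, List.mem_filter]
          exact ⟨hy, decide_eq_true ((hS y).2 ⟨hyk, hyne⟩)⟩
        -- every sg-contribution equals the g-height of the successor
        have hcsg : ∀ e ∈ (sous_graphe S g).getD x [],
            pvHC (sous_graphe S g) (fun z => pvH (sous_graphe S g) z) e = pvH g e := by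
          intro e he
          rcases hmemsg e he with ⟨heg, hek, hene⟩
          have hcon : (sous_graphe S g).contains e = true := by
            rw [pv_sg_contains S g hnd e]
            exact ⟨hek, (hS e).2 ⟨hek, hene⟩⟩
          have hgle : pvH g e ≤ pvH g x - 1 := by
            have := hdomg e heg
            have hcone : pvHC g (fun z => pvH g z) e = pvH g e + 1 := by
              unfold pvHC
              rw [if_pos ((PySem.Dict.contains_iff_mem_keys g e).2 hek)]
            omega
          have hihe : pvH (sous_graphe S g) e = pvH g e - 1 := by
            refine ih e hek hene ?_
            have h1 := pvH_nonneg g e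
            omega
          unfold pvHC
          rw [if_pos hcon]
          show pvH (sous_graphe S g) e + 1 = pvH g e
          rw [hihe]
          omega
        rw [hrecsg]
        have hle1 : (((sous_graphe S g).getD x []).foldl
            (fun a y => max a (pvHC (sous_graphe S g) (fun z => pvH (sous_graphe S g) z) y)) 0)
              ≤ pvH g x - 1 := by
          refine pvFM_le _ (by omega) (fun e he => ?_)
          rw [hcsg e he]
          rcases hmemsg e he with ⟨heg, hek, _⟩
          have := hdomg e heg
          have hcone : pvHC g (fun z => pvH g z) e = pvH g e + 1 := by
            unfold pvHC
            rw [if_pos ((PySem.Dict.contains_iff_mem_keys g e).2 hek)]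
          omega
        have hge1 : pvH g x - 1 ≤ (((sous_graphe S g).getD x []).foldl
            (fun a y => max a (pvHC (sous_graphe S g) (fun z => pvH (sous_graphe S g) z) y)) 0) := by
          have h2 := pvFM_elem_le (pvHC (sous_graphe S g) (fun z => pvH (sous_graphe S g) z)) hySmem (0 : Int)
          rw [hcsg y hySmem] at h2
          omega
        omega

-- ===== sinks, the S list, and the measure =====
theorem pv_puits_eqH (g : PySem.Dict Int (List Int)) :
    ensemble_puits g = g.keys.filter (fun x => decide (pvH g x = 0)) := by
  rw [pv_puits_eq]
  refine List.filter_congr (fun x _ => ?_)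
  rw [decide_eq_decide]
  rw [List.length_eq_zero_iff, ← pvH_zero_iff g x]

theorem pv_puits_nodup (g : PySem.Dict Int (List Int)) (hnd : g.keys.Nodup) :
    (ensemble_puits g).Nodup := by
  rw [pv_puits_eqH]; exact hnd.filter _

theorem pv_mem_puits (g : PySem.Dict Int (List Int)) (x : Int) :
    x ∈ ensemble_puits g ↔ x ∈ g.keys ∧ pvH g x = 0 := by
  rw [pv_puits_eqH, List.mem_filter]
  simp

theorem pv_S_eq (g : PySem.Dict Int (List Int)) (hnd : g.keys.Nodup) :
    (ensemble_puits g).foldl (fun s p => (PySem.List.remove? s p).getD s) (ensemble_sommet g)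
      = g.keys.filter (fun x => decide (x ∉ ensemble_puits g)) := by
  exact pv_srem _ g.keys hnd (pv_puits_nodup g hnd) (fun p hp => (pv_mem_puits g p).1 hp |>.1)

theorem pv_mem_S (g : PySem.Dict Int (List Int)) (hnd : g.keys.Nodup) (z : Int) :
    z ∈ (ensemble_puits g).foldl (fun s p => (PySem.List.remove? s p).getD s) (ensemble_sommet g)
      ↔ (z ∈ g.keys ∧ pvH g z ≠ 0) := by
  rw [pv_S_eq g hnd, List.mem_filter]
  constructor
  · rintro ⟨h1, h2⟩
    refine ⟨h1, fun h0 => ?_⟩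
    exact (of_decide_eq_true h2) ((pv_mem_puits g z).2 ⟨h1, h0⟩)
  · rintro ⟨h1, h2⟩
    refine ⟨h1, decide_eq_true (fun hp => ?_)⟩
    exact h2 ((pv_mem_puits g z).1 hp).2

-- sum comparison lemmas for the fuel measure
theorem pv_sum_le (qk : Int → Bool) (a b : Int → Nat) :
    ∀ (K : List Int), (∀ k ∈ K, a k ≤ b k) →
      ((K.filter qk).map a).sum ≤ (K.map b).sum := by
  intro K
  induction K with
  | nil => intro _; simp
  | cons k t ih =>
    intro hab
    have h1 := ih (fun k' hk' => hab k' (List.mem_cons_of_mem _ hk'))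
    by_cases hq : qk k
    · simp only [List.filter_cons, hq, if_true, List.map_cons, List.sum_cons]
      have := hab k List.mem_cons_self
      omega
    · simp only [List.filter_cons, Bool.not_eq_true] at *
      rw [if_neg (by simp [hq])]
      simp only [List.map_cons, List.sum_cons]
      omega

theorem pv_sum_lt (qk : Int → Bool) (a b : Int → Nat) :
    ∀ (K : List Int), (∀ k ∈ K, a k ≤ b k) → (∀ k ∈ K, 1 ≤ b k) →
      ((∃ k ∈ K, qk k = false) ∨ (∃ k ∈ K, qk k = true ∧ a k < b k)) →
      ((K.filter qk).map a).sum < (K.map b).sum := by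
  intro K
  induction K with
  | nil => rintro _ _ (⟨k, hk, _⟩ | ⟨k, hk, _⟩) <;> cases hk
  | cons k t ih =>
    intro hab hb1 hw
    have habt : ∀ k' ∈ t, a k' ≤ b k' := fun k' hk' => hab k' (List.mem_cons_of_mem _ hk')
    have hb1t : ∀ k' ∈ t, 1 ≤ b k' := fun k' hk' => hb1 k' (List.mem_cons_of_mem _ hk')
    have hle := pv_sum_le qk a b t habt
    have hbk := hb1 k List.mem_cons_self
    have habk := hab k List.mem_cons_self
    rcases hw with ⟨k', hk', hq⟩ | ⟨k', hk', hq, hlt⟩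
    · rcases List.mem_cons.1 hk' with rfl | hmem
      · simp only [List.filter_cons, hq, Bool.false_eq_true, if_false, List.map_cons, List.sum_cons]
        omega
      · have hstrict := ih habt hb1t (Or.inl ⟨k', hmem, hq⟩)
        rcases hqk : qk k
        · simp only [List.filter_cons, hqk, Bool.false_eq_true, if_false, List.map_cons, List.sum_cons]
          omega
        · simp only [List.filter_cons, hqk, if_true, List.map_cons, List.sum_cons]
          omega
    · rcases List.mem_cons.1 hk' with rfl | hmem
      · simp only [List.filter_cons, hq, if_true, List.map_cons, List.sum_cons]
        omega
      · have hstrict := ih habt hb1t (Or.inr ⟨k', hmem, hq, hlt⟩)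
        rcases hqk : qk k
        · simp only [List.filter_cons, hqk, Bool.false_eq_true, if_false, List.map_cons, List.sum_cons]
          omega
        · simp only [List.filter_cons, hqk, if_true, List.map_cons, List.sum_cons]
          omega

theorem pvMu_eq (g : PySem.Dict Int (List Int)) (hnd : g.keys.Nodup) :
    pvMu g = (g.keys.map (fun k => (g.getD k []).length + 1)).sum := by
  rw [pvMu, PySem.Dict.items_eq_map_keys g hnd [], List.map_map]
  simp [Function.comp_def]

theorem pvMu_sg (S : List Int) (g : PySem.Dict Int (List Int)) (hnd : g.keys.Nodup) :
    pvMu (sous_graphe S g)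
      = ((g.keys.filter (fun i => decide (i ∈ S))).map
          (fun k => ((g.getD k []).filter (fun e => decide (e ∈ S))).length + 1)).sum := by
  rw [pvMu, pv_sg_items S g hnd, List.map_map]
  simp [Function.comp_def]

theorem pv_grow (g : PySem.Dict Int (List Int))
    (hnosink : ∀ k ∈ g.keys, g.getD k [] ≠ [])
    (hclosed : ∀ k ∈ g.keys, ∀ e ∈ g.getD k [], g.contains e = true) :
    ∀ (f : Nat), ∀ k ∈ g.keys, (f : Int) ≤ pvHD g f k := by
  intro f
  induction f with
  | zero => intro k _; exact_mod_cast pvHD_nonneg g 0 k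
  | succ f ih =>
    intro k hk
    rw [pvHD_succ]
    cases hadj : g.getD k [] with
    | nil => exact absurd hadj (hnosink k hk)
    | cons e t =>
      have he : e ∈ g.getD k [] := by rw [hadj]; exact List.mem_cons_self
      have hce := hclosed k hk e he
      have hek : e ∈ g.keys := (PySem.Dict.contains_iff_mem_keys g e).1 hce
      have h1 : ((f : Int) + 1) ≤ pvHC g (fun z => pvHD g f z) e := by
        unfold pvHC
        rw [if_pos hce]
        show (f : Int) + 1 ≤ pvHD g f e + 1
        have := ih e hek
        omega
      have h2 := pvFM_elem_le (pvHC g (fun z => pvHD g f z)) he (0 : Int)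
      rw [hadj] at h2
      push_cast
      omega

theorem pv_dangle (g : PySem.Dict Int (List Int)) (hac : pvAcyc g) (hne : g.keys ≠ [])
    (hnosink : ∀ k ∈ g.keys, g.getD k [] ≠ []) :
    ∃ k ∈ g.keys, ∃ e ∈ g.getD k [], g.contains e = false := by
  by_contra h
  have hclosed : ∀ k ∈ g.keys, ∀ e ∈ g.getD k [], g.contains e = true := by
    intro k hk e he
    rcases hc : g.contains e
    · exact absurd ⟨k, hk, e, he, hc⟩ h
    · rfl
  rcases List.exists_mem_of_ne_nil _ hne with ⟨k0, hk0⟩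
  have h1 := pv_grow g hnosink hclosed (g.items.length + 1) k0 hk0
  have h2 := pvHD_acyc_le g hac (g.items.length + 1) k0 hk0
  push_cast at h1
  omega

theorem pvBcore_empty (d : PySem.Dict Int (List Int)) (hk : d.keys = []) :
    pvBcore d = (PySem.Dict.empty, 1) := by
  rw [pvBcore, hk]
  rfl

theorem pv_filter_lt {α : Type} (p : α → Bool) :
    ∀ (l : List α), (∃ e ∈ l, p e = false) → (l.filter p).length < l.length := by
  intro l
  induction l with
  | nil => rintro ⟨e, he, _⟩; cases he
  | cons a t ih =>
    rintro ⟨e, he, hpe⟩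
    have hle := List.length_filter_le p t
    rcases List.mem_cons.1 he with rfl | hmem
    · simp only [List.filter_cons, hpe, Bool.false_eq_true, if_false, List.length_cons]
      omega
    · have := ih ⟨e, hmem, hpe⟩
      rcases hpa : p a
      · simp only [List.filter_cons, hpa, Bool.false_eq_true, if_false, List.length_cons]
        omega
      · simp only [List.filter_cons, hpa, if_true, List.length_cons]
        omega

-- ===== the main equivalence, by induction on the measure =====
theorem pv_items_len_zero (d : PySem.Dict Int (List Int)) (hk : d.keys = []) :
    d.items.length = 0 := by
  rw [← pv_keys_length d, hk]
  rfl

theorem pvMain : ∀ (N : Nat) (d : PySem.Dict Int (List Int)) (f : Nat),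
    pvMu d ≤ N → pvMu d < f → d.keys.Nodup → pvAcyc d → pvArec f d = pvBcore d := by
  intro N
  induction N with
  | zero =>
    intro d f h0 hf hnd hac
    have hk : d.keys = [] := by
      rcases hitems : d.items with _ | ⟨p, t⟩
      · show d.items.map _ = []
        rw [hitems]; rfl
      · exfalso
        rw [pvMu, hitems] at h0
        simp at h0
    cases f with
    | zero => omega
    | succ f' =>
      have hA : pvArec (f' + 1) d = (PySem.Dict.empty, 1) := by
        show (if d.items.length = 0 then _ else _) = _
        rw [if_pos (pv_items_len_zero d hk)]
      rw [hA, pvBcore_empty d hk]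
  | succ N ih =>
    intro d f hN hf hnd hac
    by_cases hk : d.keys = []
    · cases f with
      | zero => omega
      | succ f' =>
        have hA : pvArec (f' + 1) d = (PySem.Dict.empty, 1) := by
          show (if d.items.length = 0 then _ else _) = _
          rw [if_pos (pv_items_len_zero d hk)]
        rw [hA, pvBcore_empty d hk]
    · cases f with
      | zero => omega
      | succ f' =>
        have hlen : ¬ d.items.length = 0 := by
          intro h0
          exact hk (by
            have : d.keys.length = 0 := by rw [pv_keys_length d]; exact h0
            exact List.length_eq_zero_iff.1 this)
        set P := ensemble_puits d with hPdef
        set Sl := P.foldl (fun s p => (PySem.List.remove? s p).getD s) (ensemble_sommet d) with hSldef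
        set sg := sous_graphe Sl d with hsgdef
        have hA : pvArec (f' + 1) d
            = (P.foldl (fun dd x => dd.insert x (pvArec f' sg).2) (pvArec f' sg).1,
               (pvArec f' sg).2 + 1) := by
          show (if d.items.length = 0 then _ else _) = _
          rw [if_neg hlen]
        have hmemS : ∀ z, z ∈ Sl ↔ (z ∈ d.keys ∧ pvH d z ≠ 0) := fun z => pv_mem_S d hnd z
        have hsgkeys : sg.keys = d.keys.filter (fun i => decide (i ∈ Sl)) := pv_sg_keys Sl d hnd
        have hsgkeysH : sg.keys = d.keys.filter (fun x => decide (¬ pvH d x = 0)) := by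
          rw [hsgkeys]
          refine List.filter_congr (fun x hx => ?_)
          rw [decide_eq_decide, hmemS]
          constructor
          · exact fun h => h.2
          · exact fun h => ⟨hx, h⟩
        have hsgnd : sg.keys.Nodup := pv_sg_nodup Sl d hnd
        have hsgac : pvAcyc sg := pv_acyc_sg Sl d hnd hac
        have hKey : ∀ x ∈ d.keys, pvH d x ≠ 0 → pvH sg x = pvH d x - 1 := fun x hx hne =>
          pvKey d hnd hac Sl (fun z => hmemS z) ((pvH d x).toNat) x hx hne le_rfl
        -- the measure strictly decreases
        have hmu : pvMu sg < pvMu d := by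
          rw [pvMu_eq d hnd, hsgdef, pvMu_sg Sl d hnd]
          by_cases hsinks : ∃ k ∈ d.keys, pvH d k = 0
          · rcases hsinks with ⟨k, hkk, hk0⟩
            refine pv_sum_lt _ _ _ d.keys
              (fun k' _ => by
                have := List.length_filter_le (fun e => decide (e ∈ Sl)) (d.getD k' [])
                omega)
              (fun k' _ => by omega)
              (Or.inl ⟨k, hkk, ?_⟩)
            rw [decide_eq_false_iff_not, hmemS]
            intro hcon
            exact hcon.2 hk0
          · have hnosink : ∀ k ∈ d.keys, d.getD k [] ≠ [] := by
              intro k hkk h0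
              exact hsinks ⟨k, hkk, (pvH_zero_iff d k).2 h0⟩
            rcases pv_dangle d hac hk hnosink with ⟨k, hkk, e, he, hce⟩
            refine pv_sum_lt _ _ _ d.keys
              (fun k' _ => by
                have := List.length_filter_le (fun e => decide (e ∈ Sl)) (d.getD k' [])
                omega)
              (fun k' _ => by omega)
              (Or.inr ⟨k, hkk, ?_, ?_⟩)
            · rw [decide_eq_true_eq, hmemS]
              refine ⟨hkk, fun h0 => hsinks ⟨k, hkk, h0⟩⟩
            · have hlt : ((d.getD k []).filter (fun e => decide (e ∈ Sl))).length
                  < (d.getD k []).length := by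
                refine pv_filter_lt _ _ ⟨e, he, ?_⟩
                rw [decide_eq_false_iff_not, hmemS]
                intro hcon
                rw [← PySem.Dict.contains_iff_mem_keys] at hcon
                rw [hcon.1] at hce
                cases hce
              omega
        have hIH : pvArec f' sg = pvBcore sg := by
          refine ih sg f' (by omega) (by omega) hsgnd hsgac
        rw [hA, hIH]
        -- B-side characterisations
        have hBd := pvBcore_spec d hnd hk
        have hm0 : 0 ≤ pvM d := by
          rcases (pv_m_spec d hk).1 with hmem
          rcases List.mem_map.1 hmem with ⟨x, _, hx⟩
          rw [← hx]
          exact pvH_nonneg d x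
        by_cases hsgne : sg.keys = []
        · -- every vertex is a sink
          have hall : ∀ x ∈ d.keys, pvH d x = 0 := by
            intro x hx
            by_contra hne0
            have : x ∈ sg.keys := by
              rw [hsgkeysH, List.mem_filter]
              exact ⟨hx, decide_eq_true hne0⟩
            rw [hsgne] at this
            cases this
          have hm : pvM d = 0 := by
            rcases List.mem_map.1 (pv_m_spec d hk).1 with ⟨x, hx, hxv⟩
            rw [← hxv, hall x hx]
          have hBsg : pvBcore sg = (PySem.Dict.empty, 1) := pvBcore_empty sg hsgne
          rw [hBsg]
          have hPkeys : P = d.keys.filter (fun x => decide (pvH d x = 0)) := pv_puits_eqH d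
          have hAitems : (P.foldl (fun dd x => dd.insert x (1 : Int)) PySem.Dict.empty).items
              = P.map (fun x => (x, (1 : Int))) := by
            rw [PySem.Dict.items_foldl_insert_fresh _ (fun x => x) (fun _ => (1 : Int))
                  PySem.Dict.empty (fun a _ => PySem.Dict.contains_empty a)
                  (by simpa using pv_puits_nodup d hnd)]
            rfl
          refine Prod.ext ?_ ?_
          · apply PySem.Dict.ext
            show (P.foldl (fun dd x => dd.insert x (1 : Int)) PySem.Dict.empty).items
              = (pvBcore d).1.items
            rw [hAitems, hBd.1, hm]
            have hr : PySem.List.pyRange 0 (-1) (-1) = [0] := by decide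
            rw [hr]
            simp only [List.flatMap_cons, List.flatMap_nil, List.append_nil]
            rw [hPkeys]
            norm_num
          · show (1 : Int) + 1 = (pvBcore d).2
            rw [hBd.2, hm]
            norm_num
        · -- the subgraph is nonempty
          have hBsg := pvBcore_spec sg hsgnd hsgne
          have hm1 : 1 ≤ pvM d := by
            rcases List.exists_mem_of_ne_nil _ hsgne with ⟨x0, hx0⟩
            have hx0' : x0 ∈ d.keys ∧ pvH d x0 ≠ 0 := by
              rw [hsgkeysH, List.mem_filter] at hx0
              exact ⟨hx0.1, of_decide_eq_true hx0.2⟩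
            have hdom := (pv_m_spec d hk).2 (pvH d x0) (List.mem_map.2 ⟨x0, hx0'.1, rfl⟩)
            have h1 := pvH_nonneg d x0
            have h2 := hx0'.2
            omega
          have hmsg : pvM sg = pvM d - 1 := by
            rcases List.mem_map.1 (pv_m_spec d hk).1 with ⟨xm, hxm, hxmv⟩
            have hxmne : pvH d xm ≠ 0 := by omega
            have hxmsg : xm ∈ sg.keys := by
              rw [hsgkeysH, List.mem_filter]
              exact ⟨hxm, decide_eq_true hxmne⟩
            have h1 : pvH sg xm = pvM d - 1 := by rw [hKey xm hxm hxmne, hxmv]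
            have hge := (pv_m_spec sg hsgne).2 (pvH sg xm) (List.mem_map.2 ⟨xm, hxmsg, rfl⟩)
            rcases List.mem_map.1 (pv_m_spec sg hsgne).1 with ⟨xs, hxs, hxsv⟩
            have hxs' : xs ∈ d.keys ∧ pvH d xs ≠ 0 := by
              rw [hsgkeysH, List.mem_filter] at hxs
              exact ⟨hxs.1, of_decide_eq_true hxs.2⟩
            have h2 : pvH sg xs = pvH d xs - 1 := hKey xs hxs'.1 hxs'.2
            have hle2 := (pv_m_spec d hk).2 (pvH d xs) (List.mem_map.2 ⟨xs, hxs'.1, rfl⟩)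
            omega
          have hn2 : (pvBcore sg).2 = pvM d + 1 := by
            rw [hBsg.2, hmsg]
            omega
          have hPkeys : P = d.keys.filter (fun x => decide (pvH d x = 0)) := pv_puits_eqH d
          have hfreshP : ∀ p ∈ P, (pvBcore sg).1.contains p = false := by
            intro p hp
            rw [pv_contains_false_iff]
            intro hmemk
            have hmemk' : p ∈ (pvBcore sg).1.items.map (fun q => q.1) := hmemk
            rcases List.mem_map.1 hmemk' with ⟨q, hq, hq1⟩
            rw [hBsg.1] at hq
            rcases List.mem_flatMap.1 hq with ⟨v, _, hqlev⟩
            rcases List.mem_map.1 hqlev with ⟨x, hxf, hxq⟩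
            have hxsg : x ∈ sg.keys := (List.mem_filter.1 hxf).1
            have hpx : p = x := by rw [← hq1, ← hxq]
            rw [hsgkeysH, List.mem_filter] at hxsg
            have hne0 : pvH d x ≠ 0 := of_decide_eq_true hxsg.2
            have h0 : pvH d p = 0 := ((pv_mem_puits d p).1 hp).2
            rw [hpx] at h0
            exact hne0 h0
          have hAitems2 : (P.foldl (fun dd x => dd.insert x (pvBcore sg).2) (pvBcore sg).1).items
              = (pvBcore sg).1.items ++ P.map (fun x => (x, (pvBcore sg).2)) :=
            PySem.Dict.items_foldl_insert_fresh _ (fun x => x) _ _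
              (fun a ha => hfreshP a ha) (by simpa using pv_puits_nodup d hnd)
          have hmNcast : ((pvM d).toNat : Int) = pvM d := Int.toNat_of_nonneg hm0
          have hrange : PySem.List.pyRange (pvM d) (-1) (-1)
              = (List.range (pvM d).toNat).map (fun (k : Nat) => pvM d - (k : Int)) ++ [0] := by
            rw [PySem.List.pyRange_neg_one]
            have h1 : (pvM d - (-1)).toNat = (pvM d).toNat + 1 := by omega
            rw [h1, List.range_succ, List.map_append]
            have h2 : pvM d - (((pvM d).toNat : Nat) : Int) = 0 := by omega
            simp only [List.map_cons, List.map_nil, h2]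
          have hrangesg : PySem.List.pyRange (pvM sg) (-1) (-1)
              = (List.range (pvM d).toNat).map (fun (k : Nat) => pvM sg - (k : Int)) := by
            rw [PySem.List.pyRange_neg_one]
            have h1 : (pvM sg - (-1)).toNat = (pvM d).toNat := by omega
            rw [h1]
          have hlev : ∀ k : Nat, k < (pvM d).toNat →
              (sg.keys.filter (fun x => decide (pvH sg x = pvM sg - (k : Int)))).map
                  (fun x => (x, pvM sg - (pvM sg - (k : Int)) + 1))
                = (d.keys.filter (fun x => decide (pvH d x = pvM d - (k : Int)))).map
                  (fun x => (x, pvM d - (pvM d - (k : Int)) + 1)) := by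
            intro k hkm
            have hkI : (k : Int) < pvM d := by omega
            have hfe : sg.keys.filter (fun x => decide (pvH sg x = pvM sg - (k : Int)))
                = d.keys.filter (fun x => decide (pvH d x = pvM d - (k : Int))) := by
              rw [hsgkeysH, List.filter_filter]
              refine List.filter_congr (fun x hx => ?_)
              by_cases h0 : pvH d x = 0
              · have hnh : ¬ ((0 : Int) = pvM d - (k : Int)) := by omega
                simp [h0, hnh]
              · have hKx := hKey x hx h0
                have hiff : (pvH sg x = pvM sg - (k : Int)) ↔ (pvH d x = pvM d - (k : Int)) := by
                  rw [hKx, hmsg]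
                  constructor <;> intro <;> omega
                simp [h0, hiff]
            rw [hfe]
            have hvv : pvM sg - (pvM sg - (k : Int)) + 1 = pvM d - (pvM d - (k : Int)) + 1 := by
              omega
            rw [hvv]
          refine Prod.ext ?_ ?_
          · apply PySem.Dict.ext
            show (P.foldl (fun dd x => dd.insert x (pvBcore sg).2) (pvBcore sg).1).items
              = (pvBcore d).1.items
            rw [hAitems2, hBd.1, hrange, List.flatMap_append]
            congr 1
            · rw [hBsg.1, hrangesg, List.flatMap_map, List.flatMap_map]
              refine pv_flatMap_congr _ (fun k hkm => ?_)
              exact hlev k (List.mem_range.1 hkm)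
            · simp only [List.flatMap_cons, List.flatMap_nil, List.append_nil]
              rw [hPkeys, hn2]
              have hv0 : pvM d - 0 + 1 = pvM d + 1 := by omega
              rw [hv0]
          · show (pvBcore sg).2 + 1 = (pvBcore d).2
            rw [hn2, hBd.2]
            omega

-- ===== VERDICT (by name: the statement is the Claim_ definition above) =====
theorem Tri_topo_sans_circuit_par_puits_spec : Claim_equal_Tri_topo_sans_circuit_par_puits := by
  intro g _ hpre
  unfold Spec_Tri_topo_sans_circuit_par_puits
  unfold Tri_topo_sans_circuit_par_puits Tri_topo_sans_circuit_par_puits_alt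
  have h := pvMain (pvMu (PySem.Dict.ofList g)) (PySem.Dict.ofList g)
    (pvMu (PySem.Dict.ofList g) + 1) le_rfl (by omega) (PySem.Dict.nodup_keys_ofList g) hpre
  show ((pvArec (pvMu (PySem.Dict.ofList g) + 1) (PySem.Dict.ofList g)).1.items,
        (pvArec (pvMu (PySem.Dict.ofList g) + 1) (PySem.Dict.ofList g)).2)
      = ((pvBcore (PySem.Dict.ofList g)).1.items, (pvBcore (PySem.Dict.ofList g)).2)
  rw [h]
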